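-- pv_equiv track=rewrite | github.com/Jeevith-gowda/n-queens | nqueens_hill_climbing.py | enumerate_neighbors
-- ===== SOURCE A (Python) =====
-- from typing import List, Tuple, Optional, Dict, Any
--
-- def compute_heuristic(state: List[int]) -> int:
--     """Compute the number of attacking queen pairs.
--
--     State representation: state[c] = row index of the queen in column c.
--
--     Two queens attack each other if they share a row or a diagonal.
--     This counts unordered pairs (i < j) that are in conflict.
--     """
--     h = 0
--     n = len(state)
--     for c1 in range(n):
--         r1 = state[c1]
--         for c2 in range(c1 + 1, n):
--             r2 = state[c2]
--             if r1 == r2: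
--                 h += 1
--             elif abs(r1 - r2) == abs(c1 - c2):
--                 h += 1
--     return h
--
-- def enumerate_neighbors(state: List[int]) -> List[Tuple[List[int], int, Tuple[int, int]]]:
--     """Generate all neighbors by moving one queen within its column to a different row.
--
--     Returns a list of tuples: (neighbor_state, neighbor_h, move)
--     where move = (column_index, new_row)
--     """
--     n = len(state)
--     neighbors: List[Tuple[List[int], int, Tuple[int, int]]] = []
--     for col in range(n):
--         current_row = state[col]
--         for new_row in range(n):
--             if new_row == current_row:
--                 continue
--             neighbor = state.copy()
--             neighbor[col] = new_row
--             h = compute_heuristic(neighbor)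
--             neighbors.append((neighbor, h, (col, new_row)))
--     return neighbors
-- ===== SOURCE B (Python) =====
-- from typing import List, Tuple
--
-- def enumerate_neighbors(state: List[int]) -> List[Tuple[List[int], int, Tuple[int, int]]]:
--     """Delta version: compute the base heuristic once, then each neighbor's h as
--     base - conflicts(col, old_row) + conflicts(col, new_row) in O(n) instead of O(n^2)."""
--     n = len(state)
--
--     def conflicts(col, row):
--         c = 0
--         for c2 in range(n):
--             if c2 == col:
--                 continue
--             r2 = state[c2]
--             if r2 == row or abs(r2 - row) == abs(c2 - col):
--                 c += 1
--         return c
--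
--     base = sum(conflicts(c, state[c]) for c in range(n)) // 2
--     neighbors = []
--     for col in range(n):
--         cur = state[col]
--         down = conflicts(col, cur)
--         for new_row in range(n):
--             if new_row != cur:
--                 neighbor = state[:col] + [new_row] + state[col + 1:]
--                 neighbors.append((neighbor, base - down + conflicts(col, new_row), (col, new_row)))
--     return neighbors
-- ===== Notes on version B (the rewrite author's own statement) =====
-- stated objective: faster
-- what changed: Instead of recomputing the full O(n^2) pairwise heuristic for each of the n^2 neighbors, B computes the base heuristic once (as half the sum of per-queen conflict counts) and obtains each neighbor's h by an O(n) delta: base minus the moved queen's old conflicts plus its new conflicts.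
import Mathlib
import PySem

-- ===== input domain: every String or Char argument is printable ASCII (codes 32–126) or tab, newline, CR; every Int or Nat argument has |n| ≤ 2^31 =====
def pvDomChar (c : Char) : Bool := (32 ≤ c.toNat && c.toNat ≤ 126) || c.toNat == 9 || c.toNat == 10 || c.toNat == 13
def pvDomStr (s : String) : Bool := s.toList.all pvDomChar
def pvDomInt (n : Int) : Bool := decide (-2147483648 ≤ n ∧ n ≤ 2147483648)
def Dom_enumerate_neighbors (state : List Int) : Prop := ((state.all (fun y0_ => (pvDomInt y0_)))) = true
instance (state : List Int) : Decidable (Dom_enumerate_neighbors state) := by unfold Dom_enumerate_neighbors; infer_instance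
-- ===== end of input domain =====

-- B replaces A's full O(n^2) heuristic recomputation per neighbor by a once-computed base
-- heuristic plus an O(n) per-move conflict delta (objective: faster).

-- ===== PORT A =====
-- literal port of compute_heuristic (nested loops over column pairs)
def compute_heuristic (state : List Int) : Int :=
  let n := state.length
  (PySem.List.pyRange 0 n).foldl (fun h c1 =>
    let r1 := PySem.List.pyGetD state c1 0
    (PySem.List.pyRange (c1 + 1) n).foldl (fun h c2 =>
      let r2 := PySem.List.pyGetD state c2 0
      if r1 = r2 then h + 1
      else if (r1 - r2).natAbs = (c1 - c2).natAbs then h + 1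
      else h) h) 0

-- port of A: for each column and row, copy the state, overwrite the column
-- (col is a nonnegative in-range index, so `neighbor[col] = new_row` is List.set), recompute h
def enumerate_neighbors (state : List Int) : List (List Int × Int × (Int × Int)) :=
  let n := state.length
  (PySem.List.pyRange 0 n).foldl (fun neighbors col =>
    let current_row := PySem.List.pyGetD state col 0
    (PySem.List.pyRange 0 n).foldl (fun neighbors new_row =>
      if new_row = current_row then neighbors
      else
        let neighbor := state.set col.toNat new_row
        let h := compute_heuristic neighbor
        neighbors ++ [(neighbor, h, (col, new_row))]) neighbors) []

-- ===== PORT B =====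
-- number of queens in other columns attacking a queen placed at (col, row)
def pvConflicts (state : List Int) (col row : Int) : Int :=
  let n := state.length
  (PySem.List.pyRange 0 n).foldl (fun c c2 =>
    if c2 = col then c
    else
      let r2 := PySem.List.pyGetD state c2 0
      if r2 = row ∨ (r2 - row).natAbs = (c2 - col).natAbs then c + 1 else c) 0

def enumerate_neighbors_alt (state : List Int) : List (List Int × Int × (Int × Int)) :=
  let n := state.length
  let base := PySem.Int.floordiv
    ((PySem.List.pyRange 0 n).foldl
      (fun s c => s + pvConflicts state c (PySem.List.pyGetD state c 0)) 0) 2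
  (PySem.List.pyRange 0 n).foldl (fun neighbors col =>
    let cur := PySem.List.pyGetD state col 0
    let down := pvConflicts state col cur
    (PySem.List.pyRange 0 n).foldl (fun neighbors new_row =>
      if new_row ≠ cur then
        neighbors ++ [(PySem.List.slice state none (some col) ++ [new_row] ++
                         PySem.List.slice state (some (col + 1)) none,
                       base - down + pvConflicts state col new_row,
                       (col, new_row))]
      else neighbors) neighbors) []

-- ===== PRECONDITION & SPEC =====
def Spec_enumerate_neighbors (state : List Int) (out : List (List Int × Int × (Int × Int))) : Prop := out = enumerate_neighbors_alt state
instance (state : List Int) (out : List (List Int × Int × (Int × Int))) : Decidable (Spec_enumerate_neighbors state out) := by unfold Spec_enumerate_neighbors; infer_instance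

-- ===== CLAIM (what is proved, stated in full; the proofs are below) =====
def Claim_equal_enumerate_neighbors : Prop := ∀ (state : List Int), Dom_enumerate_neighbors state → Spec_enumerate_neighbors state (enumerate_neighbors state)

-- ===== LEMMAS AND PROOFS =====

-- value of column i (Nat index)
def pvG (s : List Int) (i : Nat) : Int := s.getD i 0

-- conflict indicator for queens at (c1,r1), (c2,r2)
def pvInd (c1 r1 c2 r2 : Int) : Int :=
  if r1 = r2 then 1 else if (r1 - r2).natAbs = (c1 - c2).natAbs then 1 else 0

def pvF (s : List Int) (i j : Nat) : Int := pvInd i (pvG s i) j (pvG s j)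

-- total number of attacking pairs (the heuristic), as a double Finset sum
def pvH (s : List Int) : Int :=
  ∑ c1 ∈ Finset.range s.length, ∑ c2 ∈ Finset.Ico (c1 + 1) s.length, pvF s c1 c2

-- conflicts of a queen hypothetically at (col, r) against all other columns
def pvC (s : List Int) (col : Nat) (r : Int) : Int :=
  ∑ c2 ∈ (Finset.range s.length).erase col, pvInd col r c2 (pvG s c2)

lemma pvInd_symm (c1 r1 c2 r2 : Int) : pvInd c1 r1 c2 r2 = pvInd c2 r2 c1 r1 := by
  unfold pvInd
  split_ifs <;> omega

lemma pvF_symm (s : List Int) (i j : Nat) : pvF s i j = pvF s j i := pvInd_symm _ _ _ _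

-- bridge: a sum over pyRange ↑a ↑(a+d) is a Finset.Ico sum
lemma sum_pyRange_nat (f : Int → Int) : ∀ (d a : Nat),
    ((PySem.List.pyRange a (a + d : Nat)).map f).sum = ∑ i ∈ Finset.Ico a (a + d), f i := by
  intro d
  induction d with
  | zero => intro a; simp [PySem.List.pyRange]
  | succ d ih =>
    intro a
    have hlt : (a : Int) < ((a + (d + 1) : Nat) : Int) := by omega
    rw [PySem.List.pyRange_one_cons hlt]
    have h1 : ((a : Int) + 1) = ((a + 1 : Nat) : Int) := by omega
    have h2 : ((a + (d + 1) : Nat) : Int) = (((a + 1) + d : Nat) : Int) := by omega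
    have h3 : Finset.Ico a (a + (d + 1)) = insert a (Finset.Ico (a + 1) ((a + 1) + d)) := by
      ext x; simp [Finset.mem_Ico]; omega
    rw [List.map_cons, List.sum_cons, h1, h2, ih (a + 1), h3,
      Finset.sum_insert (by simp [Finset.mem_Ico])]

lemma sum_pyRange (f : Int → Int) (a b : Nat) :
    ((PySem.List.pyRange a b).map f).sum = ∑ i ∈ Finset.Ico a b, f i := by
  rcases le_or_gt a b with h | h
  · have hb : b = a + (b - a) := by omega
    rw [hb]; exact sum_pyRange_nat f (b - a) a
  · have h0 : PySem.List.pyRange (a : Int) (b : Int) = [] := by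
      simp [PySem.List.pyRange]; omega
    have h1 : Finset.Ico a b = ∅ := by simp; omega
    rw [h0, h1]; simp

lemma sum_pyRange0 (f : Int → Int) (n : Nat) :
    ((PySem.List.pyRange 0 n).map f).sum = ∑ i ∈ Finset.range n, f i := by
  have h := sum_pyRange f 0 n
  rw [Finset.range_eq_Ico]
  exact_mod_cast h

lemma pvG_natCast (s : List Int) (i : Nat) : PySem.List.pyGetD s (i : Int) 0 = pvG s i := by
  rw [PySem.List.pyGetD_natCast]; rfl

-- A's heuristic computes pvH
lemma compute_heuristic_eq (s : List Int) : compute_heuristic s = pvH s := by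
  unfold compute_heuristic pvH
  rw [PySem.List.foldl_congr_mem _ _
    (fun h c1 => h + ((PySem.List.pyRange (c1 + 1) s.length).map
      (fun c2 => pvInd c1 (PySem.List.pyGetD s c1 0) c2 (PySem.List.pyGetD s c2 0))).sum) _ ?_]
  · rw [PySem.List.foldl_add, zero_add, sum_pyRange0]
    refine Finset.sum_congr rfl (fun c1 _ => ?_)
    have hc : ((c1 : Int) + 1) = ((c1 + 1 : Nat) : Int) := by omega
    rw [hc, sum_pyRange]
    exact Finset.sum_congr rfl (fun c2 _ => by simp [pvF, pvG, List.getD])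
  · intro acc c1 _
    dsimp only
    rw [PySem.List.foldl_congr_mem _ _
      (fun h c2 => h + pvInd c1 (PySem.List.pyGetD s c1 0) c2 (PySem.List.pyGetD s c2 0)) _ ?_]
    · rw [PySem.List.foldl_add]
    · intro acc2 c2 _
      dsimp only [pvInd]
      split_ifs <;> ring

-- B's conflicts computes pvC
lemma pvConflicts_eq (s : List Int) (col : Nat) (r : Int) :
    pvConflicts s (col : Int) r = pvC s col r := by
  unfold pvConflicts pvC
  rw [PySem.List.foldl_congr_mem _ _
    (fun c c2 => c + (if c2 = (col : Int) then 0
      else pvInd col r c2 (PySem.List.pyGetD s c2 0))) _ ?_]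
  · rw [PySem.List.foldl_add, zero_add, sum_pyRange0]
    have hconv : ∀ i ∈ Finset.range s.length,
        (if (i : Int) = (col : Int) then 0 else pvInd col r i (PySem.List.pyGetD s i 0))
        = (if i = col then (0 : Int) else pvInd col r i (pvG s i)) := by
      intro i _
      rw [pvG_natCast]
      simp [Nat.cast_inj]
    rw [Finset.sum_congr rfl hconv,
      ← Finset.sum_erase (Finset.range s.length)
        (f := fun i : Nat => if i = col then (0 : Int) else pvInd col r i (pvG s i))
        (a := col) (by simp)]
    exact Finset.sum_congr rfl (fun x hx => by simp [Finset.ne_of_mem_erase hx])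
  · intro acc c2 _
    dsimp only
    by_cases h : c2 = (col : Int)
    · simp [h]
    · rw [if_neg h, if_neg h]
      have k1 : (PySem.List.pyGetD s c2 0 - r).natAbs
          = (r - PySem.List.pyGetD s c2 0).natAbs := by omega
      have k2 : (c2 - (col : Int)).natAbs = ((col : Int) - c2).natAbs := by omega
      rw [k1, k2]
      unfold pvInd
      by_cases h1 : r = PySem.List.pyGetD s c2 0
      · rw [if_pos (Or.inl h1.symm), if_pos h1]
      · by_cases h2 : (r - PySem.List.pyGetD s c2 0).natAbs = ((col : Int) - c2).natAbs
        · rw [if_pos (Or.inr h2), if_neg h1, if_pos h2]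
        · rw [if_neg (by rintro (hh | hh); exact h1 hh.symm; exact h2 hh),
            if_neg h1, if_neg h2]
          ring

-- erase a column out of Finset.range
lemma erase_range_eq (n c : Nat) (h : c < n) :
    (Finset.range n).erase c = Finset.Ico 0 c ∪ Finset.Ico (c + 1) n := by
  ext x; simp [Finset.mem_Ico, Finset.mem_erase]; omega

-- double counting: summing each queen's conflicts counts every attacking pair twice
lemma sum_pvC_eq (s : List Int) :
    ∑ c ∈ Finset.range s.length, pvC s c (pvG s c) = 2 * pvH s := by
  unfold pvC pvH
  have hstep : ∀ c ∈ Finset.range s.length,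
      ∑ c2 ∈ (Finset.range s.length).erase c, pvInd c (pvG s c) c2 (pvG s c2)
      = (∑ c2 ∈ Finset.Ico 0 c, pvF s c c2)
        + ∑ c2 ∈ Finset.Ico (c + 1) s.length, pvF s c c2 := by
    intro c hc
    rw [erase_range_eq _ _ (Finset.mem_range.mp hc),
      Finset.sum_union (Finset.disjoint_left.mpr
        (by intro x hx hy; simp [Finset.mem_Ico] at hx hy; omega))]
    rfl
  rw [Finset.sum_congr rfl hstep, Finset.sum_add_distrib]
  have htri : ∑ c ∈ Finset.range s.length, ∑ c2 ∈ Finset.Ico 0 c, pvF s c c2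
      = ∑ c ∈ Finset.range s.length, ∑ c2 ∈ Finset.Ico (c + 1) s.length, pvF s c c2 := by
    rw [Finset.range_eq_Ico, Finset.sum_Ico_Ico_comm' 0 s.length (fun i j => pvF s i j)]
    exact Finset.sum_congr rfl (fun c _ => Finset.sum_congr rfl (fun c2 _ => pvF_symm s c c2))
  rw [htri]; ring

-- the part of pvH not involving column col
def pvRest (s : List Int) (col : Nat) : Int :=
  ∑ c1 ∈ (Finset.range s.length).erase col,
    ∑ c2 ∈ (Finset.Ico (c1 + 1) s.length).erase col, pvF s c1 c2

-- split pvH into pairs avoiding col and the conflicts of col's queen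
lemma pvH_split (s : List Int) (col : Nat) (hcol : col < s.length) :
    pvH s = pvRest s col + pvC s col (pvG s col) := by
  unfold pvH pvRest pvC
  have step1 : ∀ c1 ∈ Finset.range s.length,
      ∑ c2 ∈ Finset.Ico (c1 + 1) s.length, pvF s c1 c2
      = (∑ c2 ∈ (Finset.Ico (c1 + 1) s.length).erase col, pvF s c1 c2)
        + (if c1 + 1 ≤ col then pvF s c1 col else 0) := by
    intro c1 _
    by_cases h : c1 + 1 ≤ col
    · rw [if_pos h,
        ← Finset.add_sum_erase _ _ (show col ∈ Finset.Ico (c1 + 1) s.length by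
          simp [Finset.mem_Ico]; omega)]
      ring
    · rw [if_neg h, add_zero,
        Finset.erase_eq_of_notMem (by simp [Finset.mem_Ico]; omega)]
  rw [Finset.sum_congr rfl step1, Finset.sum_add_distrib]
  have step2 : ∑ c1 ∈ Finset.range s.length,
      ∑ c2 ∈ (Finset.Ico (c1 + 1) s.length).erase col, pvF s c1 c2
      = (∑ c1 ∈ (Finset.range s.length).erase col,
          ∑ c2 ∈ (Finset.Ico (c1 + 1) s.length).erase col, pvF s c1 c2)
        + ∑ c2 ∈ Finset.Ico (col + 1) s.length, pvF s col c2 := by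
    rw [← Finset.add_sum_erase _ _ (Finset.mem_range.mpr hcol),
      Finset.erase_eq_of_notMem (by simp [Finset.mem_Ico])]
    ring
  have step3 : ∑ c1 ∈ Finset.range s.length, (if c1 + 1 ≤ col then pvF s c1 col else 0)
      = ∑ c2 ∈ Finset.Ico 0 col, pvInd col (pvG s col) c2 (pvG s c2) := by
    rw [← Finset.sum_filter]
    have hset : (Finset.range s.length).filter (fun c1 => c1 + 1 ≤ col) = Finset.Ico 0 col := by
      ext x; simp [Finset.mem_filter]; omega
    rw [hset]
    exact Finset.sum_congr rfl (fun c2 _ => (pvF_symm s c2 col).trans rfl)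
  have hpvc : ∑ c2 ∈ (Finset.range s.length).erase col, pvInd col (pvG s col) c2 (pvG s c2)
      = (∑ c2 ∈ Finset.Ico 0 col, pvInd col (pvG s col) c2 (pvG s c2))
        + ∑ c2 ∈ Finset.Ico (col + 1) s.length, pvInd col (pvG s col) c2 (pvG s c2) := by
    rw [erase_range_eq _ _ hcol,
      Finset.sum_union (Finset.disjoint_left.mpr
        (by intro x hx hy; simp [Finset.mem_Ico] at hx hy; omega))]
  have hup : ∀ c2 ∈ Finset.Ico (col + 1) s.length,
      pvF s col c2 = pvInd col (pvG s col) c2 (pvG s c2) := fun c2 _ => rfl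
  rw [step2, Finset.sum_congr rfl hup, step3, hpvc]
  ring

-- columns other than col keep their value after the move
lemma pvG_set_ne (s : List Int) (col i : Nat) (v : Int) (h : i ≠ col) :
    pvG (s.set col v) i = pvG s i := by
  unfold pvG
  simp only [List.getD]
  rw [List.getElem?_set_ne (Ne.symm h)]

lemma pvG_set_self (s : List Int) (col : Nat) (v : Int) (h : col < s.length) :
    pvG (s.set col v) col = v := by
  unfold pvG
  simp [List.getD, h]

lemma pvRest_set (s : List Int) (col : Nat) (v : Int) :
    pvRest (s.set col v) col = pvRest s col := by
  unfold pvRest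
  rw [List.length_set]
  refine Finset.sum_congr rfl (fun c1 hc1 => Finset.sum_congr rfl (fun c2 hc2 => ?_))
  unfold pvF
  rw [pvG_set_ne _ _ _ _ (Finset.ne_of_mem_erase hc1),
    pvG_set_ne _ _ _ _ (Finset.ne_of_mem_erase hc2)]

lemma pvC_set (s : List Int) (col : Nat) (v r : Int) :
    pvC (s.set col v) col r = pvC s col r := by
  unfold pvC
  rw [List.length_set]
  refine Finset.sum_congr rfl (fun c2 hc2 => ?_)
  rw [pvG_set_ne _ _ _ _ (Finset.ne_of_mem_erase hc2)]

-- the delta formula: moving the queen of column col to row v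
lemma pvH_delta (s : List Int) (col : Nat) (v : Int) (hcol : col < s.length) :
    pvH (s.set col v) = pvH s - pvC s col (pvG s col) + pvC s col v := by
  have h1 := pvH_split (s.set col v) col (by rw [List.length_set]; exact hcol)
  have h2 := pvH_split s col hcol
  rw [h1, h2, pvRest_set, pvC_set, pvG_set_self _ _ _ hcol]
  ring

-- B's base equals pvH
lemma base_eq (s : List Int) :
    PySem.Int.floordiv
      ((PySem.List.pyRange 0 s.length).foldl
        (fun t c => t + pvConflicts s c (PySem.List.pyGetD s c 0)) 0) 2 = pvH s := by
  rw [PySem.List.foldl_add, zero_add, sum_pyRange0]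
  have hconv : ∀ c ∈ Finset.range s.length,
      pvConflicts s (c : Int) (PySem.List.pyGetD s (c : Int) 0) = pvC s c (pvG s c) := by
    intro c _
    rw [pvG_natCast, pvConflicts_eq]
  rw [Finset.sum_congr rfl hconv, sum_pvC_eq,
    PySem.Int.floordiv_eq_ediv_of_pos (by omega)]
  omega

-- B's slice construction is A's List.set
lemma slice_set (s : List Int) (col : Nat) (v : Int) (h : col < s.length) :
    PySem.List.slice s none (some (col : Int)) ++ [v] ++
      PySem.List.slice s (some ((col : Int) + 1)) none = s.set col v := by
  rw [PySem.List.slice_to s (by omega), PySem.List.slice_from s (by omega)]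
  have h1 : ((col : Int)).toNat = col := by omega
  have h2 : (((col : Int)) + 1).toNat = col + 1 := by omega
  rw [h1, h2, List.set_eq_take_append_cons_drop, if_pos h]
  simp

-- the per-(col,new_row) entry lists of A and B
def blockA (s : List Int) (col : Int) : List (List Int × Int × (Int × Int)) :=
  ((PySem.List.pyRange 0 s.length).filter
    (fun nr => decide (nr ≠ PySem.List.pyGetD s col 0))).map
    (fun nr => (s.set col.toNat nr, compute_heuristic (s.set col.toNat nr), (col, nr)))

def blockB (s : List Int) (base col : Int) : List (List Int × Int × (Int × Int)) :=
  ((PySem.List.pyRange 0 s.length).filter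
    (fun nr => decide (nr ≠ PySem.List.pyGetD s col 0))).map
    (fun nr => (PySem.List.slice s none (some col) ++ [nr] ++
                  PySem.List.slice s (some (col + 1)) none,
                base - pvConflicts s col (PySem.List.pyGetD s col 0) + pvConflicts s col nr,
                (col, nr)))

lemma enumA_eq (s : List Int) :
    enumerate_neighbors s = (PySem.List.pyRange 0 s.length).flatMap (blockA s) := by
  unfold enumerate_neighbors
  rw [PySem.List.foldl_congr_mem _ _ (fun acc col => acc ++ blockA s col) _ ?_]
  · rw [PySem.List.foldl_append_eq_flatMap, List.nil_append]
  · intro acc col _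
    dsimp only
    unfold blockA
    rw [← PySem.List.foldl_append_if
      (fun nr => decide (nr ≠ PySem.List.pyGetD s col 0))
      (fun nr => (s.set col.toNat nr, compute_heuristic (s.set col.toNat nr), (col, nr)))]
    exact PySem.List.foldl_congr_mem _ _ _ _ (fun a nr _ => by
      by_cases h : nr = PySem.List.pyGetD s col 0 <;> simp [h])

lemma enumB_eq (s : List Int) :
    enumerate_neighbors_alt s = (PySem.List.pyRange 0 s.length).flatMap
      (blockB s (PySem.Int.floordiv
        ((PySem.List.pyRange 0 s.length).foldl
          (fun t c => t + pvConflicts s c (PySem.List.pyGetD s c 0)) 0) 2)) := by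
  unfold enumerate_neighbors_alt
  rw [PySem.List.foldl_congr_mem _ _
    (fun acc col => acc ++ blockB s (PySem.Int.floordiv
      ((PySem.List.pyRange 0 s.length).foldl
        (fun t c => t + pvConflicts s c (PySem.List.pyGetD s c 0)) 0) 2) col) _ ?_]
  · rw [PySem.List.foldl_append_eq_flatMap, List.nil_append]
  · intro acc col _
    dsimp only
    unfold blockB
    rw [← PySem.List.foldl_append_if
      (fun nr => decide (nr ≠ PySem.List.pyGetD s col 0))
      (fun nr => (PySem.List.slice s none (some col) ++ [nr] ++
                    PySem.List.slice s (some (col + 1)) none,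
                  PySem.Int.floordiv
                      ((PySem.List.pyRange 0 s.length).foldl
                        (fun t c => t + pvConflicts s c (PySem.List.pyGetD s c 0)) 0) 2
                    - pvConflicts s col (PySem.List.pyGetD s col 0) + pvConflicts s col nr,
                  (col, nr)))]
    exact PySem.List.foldl_congr_mem _ _ _ _ (fun a nr _ => by
      by_cases h : nr = PySem.List.pyGetD s col 0 <;> simp [h])

lemma blocks_eq (s : List Int) (col : Int)
    (hmem : col ∈ PySem.List.pyRange 0 (s.length : Int)) :
    blockA s col = blockB s (PySem.Int.floordiv
      ((PySem.List.pyRange 0 s.length).foldl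
        (fun t c => t + pvConflicts s c (PySem.List.pyGetD s c 0)) 0) 2) col := by
  obtain ⟨h0, hn⟩ := PySem.List.mem_pyRange_one.mp hmem
  obtain ⟨k, rfl⟩ : ∃ k : Nat, col = (k : Int) := ⟨col.toNat, by omega⟩
  have hklt : k < s.length := by omega
  have hkt : ((k : Int)).toNat = k := by omega
  unfold blockA blockB
  refine List.map_congr_left (fun nr _ => ?_)
  refine Prod.ext ?_ (Prod.ext ?_ rfl)
  · show s.set ((k : Int)).toNat nr = _
    rw [hkt]
    exact (slice_set s k nr hklt).symm
  · show compute_heuristic (s.set ((k : Int)).toNat nr) = _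
    rw [hkt, compute_heuristic_eq, pvH_delta s k nr hklt, base_eq, pvG_natCast,
      pvConflicts_eq, pvConflicts_eq]

-- ===== VERDICT (by name: the statement is the Claim_ definition above) =====
theorem enumerate_neighbors_spec : Claim_equal_enumerate_neighbors := by
  intro state _
  unfold Spec_enumerate_neighbors
  rw [enumA_eq, enumB_eq]
  exact List.flatMap_congr (fun col hmem => blocks_eq state col hmem)
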